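-- pv_equiv track=rewrite | github.com/guillsil/Algo1Essaya-Python | parcialitos/primer_parcialito/Recu-Parcial1.py | matriz_triangular
-- ===== SOURCE A (Python) =====
-- def crear_matriz(n):
--     """Crea una matriz de n x n"""
--     matriz = []
--     fila = []
--     for i in range(n):
--         for j in range(n):
--             fila.append(0)
--         matriz.append(fila)
--         fila = []
--     return matriz
--
-- def matriz_triangular(n):
--     """Devuelve una matriz triangular superior de dimension n x n"""
--     k = 1
--     matriz = crear_matriz(n)
--     for i in range(n):
--         for j in range(i, n):
--             matriz[i][j] = k
--             k += 1
--     return matriz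
-- ===== SOURCE B (Python) =====
-- def matriz_triangular(n):
--     """Devuelve una matriz triangular superior de dimension n x n"""
--     matriz = []
--     for i in range(n):
--         base = i * n - i * (i - 1) // 2 + 1
--         matriz.append([0] * i + list(range(base, base + (n - i))))
--     return matriz
-- ===== Notes on version B (the rewrite author's own statement) =====
-- stated objective: simpler
-- what changed: Replaces the zero-matrix pre-allocation plus a stateful running counter with per-cell assignment by a single pass that builds each row directly from a closed-form starting value computed from the row index, so no counter and no mutation remain.
import Mathlib
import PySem

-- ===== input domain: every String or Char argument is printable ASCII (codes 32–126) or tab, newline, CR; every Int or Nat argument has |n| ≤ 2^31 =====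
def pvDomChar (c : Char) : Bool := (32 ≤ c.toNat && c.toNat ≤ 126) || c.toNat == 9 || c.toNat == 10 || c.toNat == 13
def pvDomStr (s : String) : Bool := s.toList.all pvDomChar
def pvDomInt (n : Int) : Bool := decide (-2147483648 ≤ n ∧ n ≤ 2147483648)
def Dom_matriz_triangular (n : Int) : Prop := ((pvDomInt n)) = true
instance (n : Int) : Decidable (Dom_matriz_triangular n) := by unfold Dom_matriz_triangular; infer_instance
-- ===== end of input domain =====

-- B replaces A's zero-matrix allocation + running counter with rows built from a closed-form start value (objective: simpler).

-- ===== PORT A =====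
-- crear_matriz: builds fila by appending n zeros, appends it to matriz, resets fila (state = (matriz, fila))
def crear_matriz (n : Int) : List (List Int) :=
  ((PySem.List.pyRange 0 n 1).foldl
      (fun (st : List (List Int) × List Int) _i =>
        (st.1 ++ [(PySem.List.pyRange 0 n 1).foldl (fun f _j => f ++ [(0 : Int)]) st.2], []))
      ([], [])).1

-- matriz[i][j] = k : i, j come from range(n)/range(i,n) so are nonnegative and in bounds;
-- .toNat + List.set/List.getD mirror Python's in-range item assignment exactly there
def matriz_triangular (n : Int) : List (List Int) :=
  ((PySem.List.pyRange 0 n 1).foldl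
      (fun (st : List (List Int) × Int) i =>
        (PySem.List.pyRange i n 1).foldl
          (fun (st2 : List (List Int) × Int) j =>
            (st2.1.set i.toNat ((st2.1.getD i.toNat []).set j.toNat st2.2), st2.2 + 1)) st)
      (crear_matriz n, 1)).1

-- ===== PORT B =====
-- base = i*n - i*(i-1)//2 + 1  (Python's local variable, kept as a helper)
def baseB (i n : Int) : Int := i * n - PySem.Int.floordiv (i * (i - 1)) 2 + 1

def matriz_triangular_alt (n : Int) : List (List Int) :=
  (PySem.List.pyRange 0 n 1).foldl
    (fun m i =>
      m ++ [List.replicate i.toNat (0 : Int) ++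
            PySem.List.pyRange (baseB i n) (baseB i n + (n - i)) 1])
    []

-- ===== PRECONDITION & SPEC =====
def Spec_matriz_triangular (n : Int) (out : List (List Int)) : Prop := out = matriz_triangular_alt n
instance (n : Int) (out : List (List Int)) : Decidable (Spec_matriz_triangular n out) := by unfold Spec_matriz_triangular; infer_instance

-- ===== CLAIM (what is proved, stated in full; the proofs are below) =====
def Claim_equal_matriz_triangular : Prop := ∀ (n : Int), Dom_matriz_triangular n → Spec_matriz_triangular n (matriz_triangular n)

-- ===== LEMMAS AND PROOFS =====

-- the rows A's outer loop produces from row i with counter k, d rows remaining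
def rowsAux (n : Int) : Nat → Int → Int → List (List Int)
  | 0, _, _ => []
  | d + 1, i, k =>
      (List.replicate i.toNat 0 ++ PySem.List.pyRange k (k + (n - i)) 1) ::
        rowsAux n d (i + 1) (k + (n - i))

lemma fila_fold (l : List Int) (acc : List Int) :
    l.foldl (fun f _j => f ++ [(0 : Int)]) acc = acc ++ List.replicate l.length 0 := by
  induction l generalizing acc with
  | nil => simp
  | cons x xs ih => simp [List.foldl, ih, List.replicate_succ, List.append_assoc]

lemma crear_fold (n : Int) (l : List Int) (acc : List (List Int)) :
    (l.foldl
      (fun (st : List (List Int) × List Int) _i =>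
        (st.1 ++ [(PySem.List.pyRange 0 n 1).foldl (fun f _j => f ++ [(0 : Int)]) st.2], []))
      (acc, [])) = (acc ++ List.replicate l.length (List.replicate n.toNat 0), []) := by
  induction l generalizing acc with
  | nil => simp
  | cons x xs ih =>
      simp only [List.foldl_cons]
      rw [ih, fila_fold]
      simp [List.replicate_succ, List.append_assoc, PySem.List.length_pyRange_one]

lemma crear_eq (n : Int) :
    crear_matriz n = List.replicate n.toNat (List.replicate n.toNat 0) := by
  unfold crear_matriz
  rw [crear_fold]
  simp

lemma take_set_succ (r : List Int) (p : Nat) (k : Int) (hp : p < r.length) :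
    (r.set p k).take (p + 1) = r.take p ++ [k] := by
  induction r generalizing p with
  | nil => simp at hp
  | cons x xs ih =>
      cases p with
      | zero => simp
      | succ q =>
          simp only [List.set, List.take_succ_cons, List.cons_append]
          rw [ih q (by simpa using hp)]

-- inner loop: fills row iN of m at positions j..n-1 with k, k+1, …
lemma innerfill (n : Int) (iN : Nat) :
    ∀ (d : Nat) (j k : Int) (m : List (List Int)),
      0 ≤ j → j + d = n → iN < m.length → (m.getD iN []).length = n.toNat →
      (PySem.List.pyRange j n 1).foldl
        (fun (st2 : List (List Int) × Int) jj =>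
          (st2.1.set iN ((st2.1.getD iN []).set jj.toNat st2.2), st2.2 + 1)) (m, k)
      = (m.set iN ((m.getD iN []).take j.toNat ++ PySem.List.pyRange k (k + d) 1), k + d) := by
  intro d
  induction d with
  | zero =>
      intro j k m hj hjn hi hlen
      have hn : n ≤ j := by omega
      rw [PySem.List.pyRange_one_eq_nil hn, PySem.List.pyRange_one_eq_nil (by omega)]
      have hjN : j.toNat = (m.getD iN []).length := by omega
      simp only [List.foldl, hjN, List.take_length, List.append_nil]
      rw [List.getD_eq_getElem _ _ hi, List.set_getElem_self]
      simp
  | succ d ih =>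
      intro j k m hj hjn hi hlen
      have hjlt : j < n := by omega
      rw [PySem.List.pyRange_one_cons hjlt]
      simp only [List.foldl]
      have hset : (m.set iN ((m.getD iN []).set j.toNat k)).getD iN []
          = (m.getD iN []).set j.toNat k := by
        rw [List.getD_eq_getElem _ _ (by simpa using hi), List.getElem_set_self]
      rw [ih (j + 1) (k + 1) _ (by omega) (by omega) (by simpa using hi)
            (by rw [hset]; simpa using hlen)]
      rw [hset, List.set_set]
      have hjN1 : (j + 1).toNat = j.toNat + 1 := by omega
      have hjlen : j.toNat < (m.getD iN []).length := by omega
      rw [hjN1, take_set_succ _ _ _ hjlen]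
      rw [PySem.List.pyRange_one_cons (a := k) (b := k + (d + 1 : Nat)) (by push_cast; omega)]
      have : k + 1 + (d : Int) = k + ((d : Nat) + 1 : Nat) := by push_cast; omega
      simp [List.append_assoc, this]

-- counter value after the outer loop (only needed to state the fold as a pair)
def ctrAux (n : Int) : Nat → Int → Int → Int
  | 0, _, k => k
  | d + 1, i, k => ctrAux n d (i + 1) (k + (n - i))

lemma outerfill (n : Int) :
    ∀ (d : Nat) (i k : Int) (P : List (List Int)),
      0 ≤ i → i + d = n → P.length = i.toNat →
      (PySem.List.pyRange i n 1).foldl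
        (fun (st : List (List Int) × Int) ii =>
          (PySem.List.pyRange ii n 1).foldl
            (fun (st2 : List (List Int) × Int) jj =>
              (st2.1.set ii.toNat ((st2.1.getD ii.toNat []).set jj.toNat st2.2), st2.2 + 1)) st)
        (P ++ List.replicate d (List.replicate n.toNat 0), k)
      = (P ++ rowsAux n d i k, ctrAux n d i k) := by
  intro d
  induction d with
  | zero =>
      intro i k P hi hin hP
      rw [PySem.List.pyRange_one_eq_nil (by omega)]
      simp [rowsAux, ctrAux]
  | succ d ih =>
      intro i k P hi hin hP
      have hilt : i < n := by omega
      rw [PySem.List.pyRange_one_cons hilt]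
      simp only [List.foldl]
      set Z := List.replicate n.toNat (0 : Int) with hZ
      have hm : P ++ List.replicate (d + 1) Z = P ++ Z :: List.replicate d Z := by
        simp [List.replicate_succ]
      have hgetD : (P ++ Z :: List.replicate d Z).getD i.toNat [] = Z := by
        rw [List.getD_eq_getElem _ _ (by simp; omega)]
        rw [List.getElem_append_right (by omega)]
        simp [hP]
      have hd2 : i + ((n - i).toNat : Int) = n := by omega
      rw [hm, innerfill n i.toNat (n - i).toNat i k _ hi hd2 (by simp; omega)
            (by rw [hgetD, hZ]; simp)]
      rw [hgetD]
      have htake : Z.take i.toNat = List.replicate i.toNat (0 : Int) := by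
        rw [hZ, List.take_replicate]; congr 1; omega
      have hcast : k + (((n - i).toNat : Nat) : Int) = k + (n - i) := by omega
      have hsetm : (P ++ Z :: List.replicate d Z).set i.toNat
          (List.replicate i.toNat (0 : Int) ++ PySem.List.pyRange k (k + (n - i)) 1)
          = (P ++ [List.replicate i.toNat (0 : Int) ++ PySem.List.pyRange k (k + (n - i)) 1])
            ++ List.replicate d Z := by
        rw [show i.toNat = P.length + 0 by omega, List.set_append_right _ _ (by omega)]
        simp
      rw [htake, hcast, hsetm]
      rw [ih (i + 1) (k + (n - i)) _ (by omega) (by omega) (by simp [hP]; omega)]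
      simp [rowsAux, ctrAux, List.append_assoc]

lemma baseB_succ (i n : Int) :
    baseB (i + 1) n = baseB i n + (n - i) := by
  unfold baseB
  obtain ⟨t, ht⟩ : Even (i * (i - 1)) := by
    have := Int.even_mul_succ_self (i - 1)
    simpa [mul_comm] using this
  obtain ⟨s, hs⟩ : Even ((i + 1) * (i + 1 - 1)) := by
    have := Int.even_mul_succ_self i
    simpa [mul_comm] using this
  have hft : PySem.Int.floordiv (i * (i - 1)) 2 = t := by
    rw [ht, PySem.Int.floordiv_eq_ediv_of_pos (by norm_num)]
    omega
  have hfs : PySem.Int.floordiv ((i + 1) * (i + 1 - 1)) 2 = s := by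
    rw [hs, PySem.Int.floordiv_eq_ediv_of_pos (by norm_num)]
    omega
  rw [hft, hfs]
  have h1 : i * (i - 1) = t + t := ht
  have h2 : (i + 1) * (i + 1 - 1) = s + s := hs
  nlinarith [h1, h2]

lemma alt_fold (n : Int) :
    ∀ (d : Nat) (i : Int) (acc : List (List Int)),
      0 ≤ i → i + d = n →
      (PySem.List.pyRange i n 1).foldl
        (fun m ii =>
          m ++ [List.replicate ii.toNat (0 : Int) ++
                PySem.List.pyRange (baseB ii n) (baseB ii n + (n - ii)) 1]) acc
      = acc ++ rowsAux n d i (baseB i n) := by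
  intro d
  induction d with
  | zero =>
      intro i acc hi hin
      rw [PySem.List.pyRange_one_eq_nil (by omega)]
      simp [rowsAux]
  | succ d ih =>
      intro i acc hi hin
      rw [PySem.List.pyRange_one_cons (by omega)]
      simp only [List.foldl]
      rw [ih (i + 1) _ (by omega) (by omega)]
      rw [baseB_succ]
      simp [rowsAux, List.append_assoc]

-- ===== VERDICT (by name: the statement is the Claim_ definition above) =====
theorem matriz_triangular_spec : Claim_equal_matriz_triangular := by
  intro n _
  unfold Spec_matriz_triangular matriz_triangular matriz_triangular_alt
  by_cases hn : n ≤ 0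
  · rw [PySem.List.pyRange_one_eq_nil hn]
    simp [crear_eq, Int.toNat_of_nonpos hn]
  · have h0 : (0 : Int) + (n.toNat : Nat) = n := by omega
    rw [crear_eq]
    rw [show List.replicate n.toNat (List.replicate n.toNat (0 : Int))
          = ([] : List (List Int)) ++ List.replicate n.toNat (List.replicate n.toNat 0) by simp]
    rw [outerfill n n.toNat 0 1 [] le_rfl h0 (by simp)]
    rw [alt_fold n n.toNat 0 [] le_rfl h0]
    have hb : baseB 0 n = 1 := by
      unfold baseB
      norm_num [PySem.Int.floordiv]
    rw [hb]
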